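-- pv_equiv track=rewrite | github.com/jh000107/CS111 | Problem Sets/PS7/ps7image/ps7pr5.py | fold_diag
-- ===== SOURCE A (Python) =====
-- def create_uniform_image(height, width, pixel):
--     """ creates and returns a 2-D list of pixels with height rows and
--         width columns in which all of the pixels have the RGB values
--         given by pixel
--         inputs: height and width are non-negative integers
--                 pixel is a 1-D list of RBG values of the form [R,G,B],
--                      where each element is an integer between 0 and 255.
--     """
--     pixels = []
--
--     for r in range(height):
--         row = [pixel] * width
--         pixels += [row]
--
--     return pixels
--
-- def blank_image(height, width):
--     """ creates and returns a 2-D list of pixels with height rows and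
--         width columns in which all of the pixels are green.
--         inputs: height and width are non-negative integers
--     """
--     all_green = create_uniform_image(height, width, [0, 255, 0])
--     return all_green
--
-- def fold_diag(pixels):
--     """ returns a new 2-D list of pixels for an image in which the original is
--         "folded" along its diagonal
--         input: pixels --> 2-D list pixels
--     """
--     height = len(pixels)
--     width = len(pixels[0])
--     new_image = blank_image(height, width)
--     for x in range(height):
--         for y in range(width):
--             new_image[x][y] = pixels[x][y]
--     for x in range(1, height):
--         for y in range(x):
--             new_image[x][y] = [255, 255, 255]
--     return new_image
-- ===== SOURCE B (Python) =====
-- def fold_diag(pixels):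
--     """ returns a new 2-D list of pixels for an image in which the original is
--         "folded" along its diagonal: recursion over the rows carrying the
--         growing white prefix, splicing it onto the rest of each row.
--     """
--     w = len(pixels[0])
--
--     def go(rows, whites):
--         if not rows:
--             return []
--         return [whites + rows[0][len(whites):w]] + go(rows[1:], whites + [[255, 255, 255]])
--
--     return go(pixels, [])
-- ===== Notes on version B (the rewrite author's own statement) =====
-- stated objective: alternative
-- what changed: B replaces A's two staged index loops over a preallocated green image (copy all pixels, then overwrite the lower triangle cell by cell) with a recursion over the rows that carries a growing list of white pixels as an accumulator and emits each output row as one splice whites + row[len(whites):w], with no per-cell conditional, no index arithmetic and no blank image.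
import Mathlib
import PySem

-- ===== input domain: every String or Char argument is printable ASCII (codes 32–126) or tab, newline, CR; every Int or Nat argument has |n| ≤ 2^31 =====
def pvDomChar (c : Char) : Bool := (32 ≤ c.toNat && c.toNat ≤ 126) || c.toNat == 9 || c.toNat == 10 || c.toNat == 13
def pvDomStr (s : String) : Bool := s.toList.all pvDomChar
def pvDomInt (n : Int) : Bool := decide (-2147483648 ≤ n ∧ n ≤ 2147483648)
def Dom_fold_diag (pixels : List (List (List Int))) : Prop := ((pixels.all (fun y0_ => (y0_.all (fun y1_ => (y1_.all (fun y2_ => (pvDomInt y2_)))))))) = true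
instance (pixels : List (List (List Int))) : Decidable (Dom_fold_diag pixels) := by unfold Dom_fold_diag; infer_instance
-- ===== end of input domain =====

-- B replaces A's copy-then-whiten index loops over a preallocated green image by a recursion
-- over the rows carrying a growing white-prefix accumulator, emitting each output row as one
-- splice whites ++ row[len(whites):w].

-- ===== PORT A =====
def create_uniform_image (height width : Int) (pixel : List Int) : List (List (List Int)) :=
  (PySem.List.pyRange 0 height).foldl (fun acc _r => acc ++ [List.replicate width.toNat pixel]) []

def blank_image (height width : Int) : List (List (List Int)) :=
  create_uniform_image height width [0, 255, 0]

-- locals height/width of the Python are inlined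
def fold_diag (pixels : List (List (List Int))) : List (List (List Int)) :=
  (PySem.List.pyRange 1 (pixels.length : Int)).foldl (fun img x =>
      (PySem.List.pyRange 0 x).foldl (fun img y =>
        img.set x.toNat ((img.getD x.toNat []).set y.toNat [255, 255, 255])) img)
    ((PySem.List.pyRange 0 (pixels.length : Int)).foldl (fun img x =>
      (PySem.List.pyRange 0 ((pixels.headD []).length : Int)).foldl (fun img y =>
        img.set x.toNat ((img.getD x.toNat []).set y.toNat
          ((pixels.getD x.toNat []).getD y.toNat []))) img)
      (blank_image (pixels.length : Int) ((pixels.headD []).length : Int)))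

-- ===== PORT B =====
-- the inner recursive helper `go(rows, whites)` of Source B
def fold_diag_go (w : Int) (rows : List (List (List Int))) (whites : List (List Int)) :
    List (List (List Int)) :=
  match rows with
  | [] => []
  | r :: rs =>
      (whites ++ PySem.List.slice r (some (whites.length : Int)) (some w))
        :: fold_diag_go w rs (whites ++ [[255, 255, 255]])

def fold_diag_alt (pixels : List (List (List Int))) : List (List (List Int)) :=
  fold_diag_go ((pixels.headD []).length : Int) pixels []

-- ===== PRECONDITION & SPEC =====
-- Pre_ excludes exactly the inputs where the Python A raises IndexError: the empty list
-- (len(pixels[0])), a row shorter than the first row, and height > width + 1 (the whitening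
-- loop assigns new_image[x][y] past the end of a row).
def Pre_fold_diag (pixels : List (List (List Int))) : Prop :=
  pixels ≠ [] ∧ (∀ row ∈ pixels, (pixels.headD []).length ≤ row.length) ∧
    pixels.length ≤ (pixels.headD []).length + 1
instance (pixels : List (List (List Int))) : Decidable (Pre_fold_diag pixels) := by
  unfold Pre_fold_diag; infer_instance

def pvWitness_fold_diag : List (List (List Int)) :=
  [[[1, 2, 3], [4, 5, 6]], [[7, 8, 9], [10, 11, 12]]]

def Spec_fold_diag (pixels : List (List (List Int))) (out : List (List (List Int))) : Prop :=
  out = fold_diag_alt pixels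
instance (pixels : List (List (List Int))) (out : List (List (List Int))) : Decidable (Spec_fold_diag pixels out) := by unfold Spec_fold_diag; infer_instance

-- ===== CLAIM (what is proved, stated in full; the proofs are below) =====
def Claim_equal_fold_diag : Prop := ∀ (pixels : List (List (List Int))), Dom_fold_diag pixels → Pre_fold_diag pixels → Spec_fold_diag pixels (fold_diag pixels)

-- ===== LEMMAS AND PROOFS =====

/-- A fold that sets position `y` to a function of its current value, over distinct indices,
keeps the length. -/
lemma foldl_set_length {α : Type} (d : α) (F : Nat → α → α) (ys : List Nat) (g : List α) :
    (ys.foldl (fun r y => r.set y (F y (r.getD y d))) g).length = g.length := by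
  induction ys generalizing g with
  | nil => rfl
  | cons y ys ih =>
    rw [List.foldl_cons, ih]
    simp

/-- Value at `i` after setting each index of `ys` (distinct) to a function of its own value. -/
lemma foldl_update {α : Type} (d : α) (F : Nat → α → α) (ys : List Nat) (g : List α)
    (hnd : ys.Nodup) (i : Nat) (hi : i < g.length) :
    (ys.foldl (fun r y => r.set y (F y (r.getD y d))) g).getD i d
      = if i ∈ ys then F i (g.getD i d) else g.getD i d := by
  induction ys generalizing g with
  | nil => simp
  | cons y ys ih =>
    rcases List.nodup_cons.mp hnd with ⟨hy, hnd'⟩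
    rw [List.foldl_cons, ih _ hnd' (by simpa using hi)]
    by_cases hiy : i = y
    · subst hiy
      simp [hy, List.getD_eq_getElem?_getD, List.getElem?_set_self hi]
    · have hne : y ≠ i := fun h => hiy h.symm
      simp [List.getD_eq_getElem?_getD, List.getElem?_set_ne hne, List.mem_cons, hiy]

/-- A fold whose every step rewrites the same fixed position `k` factors through that row. -/
lemma fold_set_fixed {α : Type} (d : α) (G : α → Nat → α) (k : Nat) (js : List Nat)
    (img : List α) (hk : k < img.length) :
    js.foldl (fun im j => im.set k (G (im.getD k d) j)) img
      = img.set k (js.foldl G (img.getD k d)) := by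
  induction js generalizing img with
  | nil =>
    rw [List.foldl_nil, List.foldl_nil, List.getD_eq_getElem _ _ hk, List.set_getElem_self]
  | cons j js ih =>
    rw [List.foldl_cons, ih _ (by simpa using hk), List.set_set, List.foldl_cons,
      List.getD_eq_getElem?_getD, List.getElem?_set_self hk]
    rfl

/-- The nested image loop (inner loop over columns of row `k`) in row-update form. -/
lemma nested_loop_eq (v : Nat → Nat → List Int) (js : Nat → List Nat) (ks : List Nat)
    (img : List (List (List Int))) (hb : ∀ k ∈ ks, k < img.length) :
    ks.foldl (fun im k => (js k).foldl
        (fun im' j => im'.set k ((im'.getD k []).set j (v k j))) im) img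
      = ks.foldl (fun im k =>
          im.set k ((js k).foldl (fun r j => r.set j (v k j)) (im.getD k []))) img := by
  induction ks generalizing img with
  | nil => rfl
  | cons k ks ih =>
    rw [List.foldl_cons, List.foldl_cons,
      fold_set_fixed [] (fun r j => r.set j (v k j)) k (js k) img (hb k (by simp))]
    exact ih _ (fun k' hk' => by
      simpa using hb k' (List.mem_cons_of_mem _ hk'))

/-- The common value of both programs. -/
def specImg (pixels : List (List (List Int))) : List (List (List Int)) :=
  (List.range pixels.length).map (fun i =>
    (List.range (pixels.headD []).length).map (fun j =>
      if j < i then [255, 255, 255] else ((pixels.getD i []).getD j [])))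

/-- One output row of B: the white prefix spliced onto the rest of the row, as a map. -/
lemma row_splice_eq (r : List (List Int)) (k w : Nat) (hk : k ≤ w) (hw : w ≤ r.length) :
    List.replicate k ([255, 255, 255] : List Int) ++ (r.drop k).take (w - k)
      = (List.range w).map (fun j =>
          if j < k then ([255, 255, 255] : List Int) else r.getD j []) := by
  apply List.ext_getElem?
  intro j
  by_cases hj : j < w
  · by_cases hjk : j < k
    · rw [List.getElem?_append_left (by simpa using hjk), List.getElem?_replicate,
        List.getElem?_map, List.getElem?_range hj]
      simp [hjk]
    · rw [List.getElem?_append_right (by simpa using not_lt.mp hjk), List.getElem?_map,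
        List.getElem?_range hj]
      rw [List.length_replicate, List.getElem?_take_of_lt (by omega), List.getElem?_drop]
      have hjr : k + (j - k) = j := by omega
      rw [hjr, List.getElem?_eq_getElem (by omega)]
      simp [hjk, List.getD_eq_getElem?_getD, List.getElem?_eq_getElem (show j < r.length by omega)]
  · rw [List.getElem?_eq_none, List.getElem?_eq_none]
    · rw [List.length_map, List.length_range]; omega
    · rw [List.length_append, List.length_replicate, List.length_take, List.length_drop]
      omega

/-- The recursion of B with white prefix `replicate k`, in closed form. -/
lemma go_eq (w : Nat) (rows : List (List (List Int))) (k : Nat)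
    (hrow : ∀ r ∈ rows, w ≤ r.length) (hk : k + rows.length ≤ w + 1) :
    fold_diag_go (w : Int) rows (List.replicate k ([255, 255, 255] : List Int))
      = (List.range rows.length).map (fun i =>
          (List.range w).map (fun j =>
            if j < k + i then ([255, 255, 255] : List Int)
            else (rows.getD i []).getD j [])) := by
  induction rows generalizing k with
  | nil => rfl
  | cons r rs ih =>
    rw [fold_diag_go, List.length_replicate, PySem.List.slice_natCast]
    have hk' : k ≤ w := by simp at hk; omega
    rw [row_splice_eq r k w hk' (hrow r (by simp))]
    rw [← List.replicate_succ']
    rw [ih (k + 1) (fun r' hr' => hrow r' (List.mem_cons_of_mem _ hr'))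
        (by simp at hk ⊢; omega)]
    rw [List.length_cons, List.range_succ_eq_map, List.map_cons, List.map_map]
    refine congrArg₂ List.cons ?_ ?_
    · simp
    · apply List.map_congr_left
      intro i _
      simp only [Function.comp_apply, List.getD_cons_succ]
      have h : k + 1 + i = k + (i + 1) := by omega
      rw [h]

lemma alt_eq_spec (pixels : List (List (List Int))) (hp : Pre_fold_diag pixels) :
    fold_diag_alt pixels = specImg pixels := by
  obtain ⟨hne, hrow, hlen⟩ := hp
  unfold fold_diag_alt specImg
  have := go_eq (pixels.headD []).length pixels 0 hrow (by omega)
  simpa using this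

lemma mem_shift (n : Nat) (i : Nat) :
    i ∈ (List.range n).map (fun k => k + 1) ↔ 1 ≤ i ∧ i < n + 1 := by
  simp only [List.mem_map, List.mem_range]
  constructor
  · rintro ⟨m, hm, rfl⟩; omega
  · rintro ⟨h1, h2⟩; exact ⟨i - 1, by omega, by omega⟩

lemma getElem?_eq_some_getD {β : Type} (l : List β) (d : β) (i : Nat) (h : i < l.length) :
    l[i]? = some (l.getD i d) := by
  rw [List.getElem?_eq_getElem h, List.getD_eq_getElem _ _ h]

lemma a_eq_spec (pixels : List (List (List Int))) : fold_diag pixels = specImg pixels := by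
  have hgreen : blank_image (pixels.length : Int) ((pixels.headD []).length : Int)
      = List.replicate pixels.length
          (List.replicate (pixels.headD []).length ([0, 255, 0] : List Int)) := by
    unfold blank_image create_uniform_image
    rw [PySem.List.foldl_append_singleton_eq_map
      (fun _r : Int => List.replicate ((pixels.headD []).length : Int).toNat ([0,255,0] : List Int))]
    simp only [PySem.List.pyRange_zero_nat, List.map_map, Function.comp_def,
      Int.toNat_natCast, List.nil_append]
    rw [List.map_const']
    simp only [List.length_range]
  unfold fold_diag
  rw [hgreen]
  simp only [PySem.List.pyRange_zero_nat, List.foldl_map, Int.toNat_natCast]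
  rw [PySem.List.pyRange_one 1 (pixels.length : Int)]
  have hn1 : ((pixels.length : Int) - 1).toNat = pixels.length - 1 := by omega
  rw [hn1]
  simp only [List.foldl_map]
  have hc1 : ∀ k : Nat, (1 : Int) + (k : Int) = ((k + 1 : Nat) : Int) := by
    intro k; push_cast; ring
  simp only [hc1, Int.toNat_natCast, PySem.List.pyRange_zero_nat, List.foldl_map]
  -- pull the (+1) shift of the whitening loop into the index list
  rw [← List.foldl_map (f := fun k : Nat => k + 1)
      (g := fun (im : List (List (List Int))) (m : Nat) =>
        (List.range m).foldl
          (fun im' j => im'.set m ((im'.getD m []).set j ([255,255,255] : List Int))) im)]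
  -- put both nested loops into row-update form
  rw [nested_loop_eq (fun k j => (pixels.getD k []).getD j [])
      (fun _ => List.range (pixels.headD []).length) (List.range pixels.length) _
      (by intro k hk; simpa using List.mem_range.mp hk)]
  have hlenCopy :
      ((List.range pixels.length).foldl (fun im k =>
          im.set k ((List.range (pixels.headD []).length).foldl
            (fun r j => r.set j ((pixels.getD k []).getD j [])) (im.getD k [])))
        (List.replicate pixels.length
          (List.replicate (pixels.headD []).length ([0,255,0] : List Int)))).length
      = pixels.length := by
    have := foldl_set_length ([] : List (List Int))
      (fun k r => (List.range (pixels.headD []).length).foldl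
        (fun r' j => r'.set j ((pixels.getD k []).getD j [])) r)
      (List.range pixels.length)
      (List.replicate pixels.length
        (List.replicate (pixels.headD []).length ([0,255,0] : List Int)))
    simpa using this
  rw [nested_loop_eq (fun _ _ => ([255,255,255] : List Int)) (fun m => List.range m)
      ((List.range (pixels.length - 1)).map (fun k => k + 1)) _
      (by intro k hk
          rw [hlenCopy]
          rcases (mem_shift _ _).mp hk with ⟨h1, h2⟩
          omega)]
  -- row after the copy loop
  have hrowCopy : ∀ i, i < pixels.length →
      ((List.range pixels.length).foldl (fun im k =>
          im.set k ((List.range (pixels.headD []).length).foldl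
            (fun r j => r.set j ((pixels.getD k []).getD j [])) (im.getD k [])))
        (List.replicate pixels.length
          (List.replicate (pixels.headD []).length ([0,255,0] : List Int)))).getD i []
      = (List.range (pixels.headD []).length).foldl
          (fun r j => r.set j ((pixels.getD i []).getD j []))
          (List.replicate (pixels.headD []).length ([0,255,0] : List Int)) := by
    intro i hi
    have := foldl_update ([] : List (List Int))
      (fun k r => (List.range (pixels.headD []).length).foldl
        (fun r' j => r'.set j ((pixels.getD k []).getD j [])) r)
      (List.range pixels.length)
      (List.replicate pixels.length
        (List.replicate (pixels.headD []).length ([0,255,0] : List Int)))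
      List.nodup_range i (by simpa using hi)
    simpa [List.mem_range.mpr hi, List.getD_eq_getElem?_getD, List.getElem?_replicate, hi]
      using this
  -- properties of the per-row folds
  have hrowC_len : ∀ i,
      ((List.range (pixels.headD []).length).foldl
        (fun r j => r.set j ((pixels.getD i []).getD j []))
        (List.replicate (pixels.headD []).length ([0,255,0] : List Int))).length
      = (pixels.headD []).length := by
    intro i
    have := foldl_set_length ([] : List Int) (fun j _ => (pixels.getD i []).getD j [])
      (List.range (pixels.headD []).length)
      (List.replicate (pixels.headD []).length ([0,255,0] : List Int))
    simpa using this
  have hrowC_get : ∀ i j, j < (pixels.headD []).length →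
      ((List.range (pixels.headD []).length).foldl
        (fun r j => r.set j ((pixels.getD i []).getD j []))
        (List.replicate (pixels.headD []).length ([0,255,0] : List Int))).getD j []
      = (pixels.getD i []).getD j [] := by
    intro i j hj
    have := foldl_update ([] : List Int) (fun j _ => (pixels.getD i []).getD j [])
      (List.range (pixels.headD []).length)
      (List.replicate (pixels.headD []).length ([0,255,0] : List Int))
      List.nodup_range j (by simpa using hj)
    rw [if_pos (List.mem_range.mpr hj)] at this
    simpa using this
  have hW_len : ∀ (m : Nat) (r : List (List Int)),
      ((List.range m).foldl (fun r' j => r'.set j ([255,255,255] : List Int)) r).length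
      = r.length := by
    intro m r
    have := foldl_set_length ([] : List Int) (fun _ _ => ([255,255,255] : List Int))
      (List.range m) r
    simpa using this
  have hW_get : ∀ (m : Nat) (r : List (List Int)) (j : Nat), j < r.length →
      ((List.range m).foldl (fun r' j => r'.set j ([255,255,255] : List Int)) r).getD j []
      = if j < m then ([255,255,255] : List Int) else r.getD j [] := by
    intro m r j hj
    have := foldl_update ([] : List Int) (fun _ _ => ([255,255,255] : List Int))
      (List.range m) r List.nodup_range j hj
    simpa [List.mem_range] using this
  -- final length
  have hlenFinal :
      (((List.range (pixels.length - 1)).map (fun k => k + 1)).foldl (fun im m =>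
          im.set m ((List.range m).foldl (fun r j => r.set j ([255,255,255] : List Int))
            (im.getD m [])))
        ((List.range pixels.length).foldl (fun im k =>
          im.set k ((List.range (pixels.headD []).length).foldl
            (fun r j => r.set j ((pixels.getD k []).getD j [])) (im.getD k [])))
          (List.replicate pixels.length
            (List.replicate (pixels.headD []).length ([0,255,0] : List Int))))).length
      = pixels.length := by
    have := foldl_set_length ([] : List (List Int))
      (fun m r => (List.range m).foldl (fun r' j => r'.set j ([255,255,255] : List Int)) r)
      ((List.range (pixels.length - 1)).map (fun k => k + 1))
      ((List.range pixels.length).foldl (fun im k =>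
        im.set k ((List.range (pixels.headD []).length).foldl
          (fun r j => r.set j ((pixels.getD k []).getD j [])) (im.getD k [])))
        (List.replicate pixels.length
          (List.replicate (pixels.headD []).length ([0,255,0] : List Int))))
    rw [this, hlenCopy]
  -- final rows
  have hnodupShift : ((List.range (pixels.length - 1)).map (fun k => k + 1)).Nodup :=
    List.nodup_range.map (fun a b h => by omega)
  have hrowFinal : ∀ i, i < pixels.length →
      (((List.range (pixels.length - 1)).map (fun k => k + 1)).foldl (fun im m =>
          im.set m ((List.range m).foldl (fun r j => r.set j ([255,255,255] : List Int))
            (im.getD m [])))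
        ((List.range pixels.length).foldl (fun im k =>
          im.set k ((List.range (pixels.headD []).length).foldl
            (fun r j => r.set j ((pixels.getD k []).getD j [])) (im.getD k [])))
          (List.replicate pixels.length
            (List.replicate (pixels.headD []).length ([0,255,0] : List Int))))).getD i []
      = (List.range i).foldl (fun r' j => r'.set j ([255,255,255] : List Int))
          ((List.range (pixels.headD []).length).foldl
            (fun r j => r.set j ((pixels.getD i []).getD j []))
            (List.replicate (pixels.headD []).length ([0,255,0] : List Int))) := by
    intro i hi
    have hup := foldl_update ([] : List (List Int))
      (fun m r => (List.range m).foldl (fun r' j => r'.set j ([255,255,255] : List Int)) r)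
      ((List.range (pixels.length - 1)).map (fun k => k + 1))
      ((List.range pixels.length).foldl (fun im k =>
        im.set k ((List.range (pixels.headD []).length).foldl
          (fun r j => r.set j ((pixels.getD k []).getD j [])) (im.getD k [])))
        (List.replicate pixels.length
          (List.replicate (pixels.headD []).length ([0,255,0] : List Int))))
      hnodupShift i (by rw [hlenCopy]; exact hi)
    rw [hup, hrowCopy i hi]
    by_cases hmem : i ∈ (List.range (pixels.length - 1)).map (fun k => k + 1)
    · simp [hmem]
    · have hi0 : i = 0 := by
        rcases Nat.eq_zero_or_pos i with h | h
        · exact h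
        · exfalso; exact hmem ((mem_shift _ _).mpr ⟨h, by omega⟩)
      subst hi0
      simp [hmem]
  -- outer extensionality
  apply List.ext_getElem?
  intro i
  by_cases hi : i < pixels.length
  · rw [getElem?_eq_some_getD _ ([] : List (List Int)) i (by rw [hlenFinal]; exact hi),
        getElem?_eq_some_getD _ ([] : List (List Int)) i (by simp [specImg]; exact hi)]
    rw [hrowFinal i hi]
    have hspecrow : (specImg pixels).getD i []
        = (List.range (pixels.headD []).length).map
            (fun j => if j < i then ([255,255,255] : List Int)
              else (pixels.getD i []).getD j []) := by
      simp [specImg, List.getD_eq_getElem?_getD, List.getElem?_range hi]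
    rw [hspecrow]
    congr 1
    apply List.ext_getElem?
    intro j
    by_cases hj : j < (pixels.headD []).length
    · rw [getElem?_eq_some_getD _ ([] : List Int) j
          (by rw [hW_len, hrowC_len]; exact hj),
        getElem?_eq_some_getD _ ([] : List Int) j (by simpa using hj),
        hW_get i _ j (by rw [hrowC_len]; exact hj)]
      simp only [List.getD_eq_getElem?_getD, List.getElem?_map, List.getElem?_range hj,
        Option.map_some, Option.getD_some]
      by_cases hji : j < i
      · simp [hji]
      · have hcg := hrowC_get i j hj
        simp at hcg
        simp [hji, hcg]
    · rw [List.getElem?_eq_none (by rw [hW_len, hrowC_len]; omega),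
        List.getElem?_eq_none (by rw [List.length_map, List.length_range]; omega)]
  · rw [List.getElem?_eq_none (by rw [hlenFinal]; omega),
      List.getElem?_eq_none (by simp [specImg]; omega)]

-- ===== VERDICT (by name: the statement is the Claim_ definition above) =====
theorem fold_diag_spec : Claim_equal_fold_diag := by
  intro pixels _ hpre
  unfold Spec_fold_diag
  rw [a_eq_spec, alt_eq_spec _ hpre]
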